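-- pv_equiv track=rewrite | github.com/UninspiredCarrot/advent-of-code | 2023/day14.py | calc
-- ===== SOURCE A (Python) =====
-- def get_column(j, platform):
--     column = []
--     for line in platform:
--         column.append(line[j])
--     return column
--
-- def calc(platform):
--     total = 0
--     for i in range(len(platform[0])):
--         column = get_column(i, platform)
--         for j, rock in enumerate(column):
--             if rock == 'O':
--                 total += len(column)-j
--     return total
-- ===== SOURCE B (Python) =====
-- def calc(platform):
--     height = len(platform)
--     return sum((height - i) * row.count('O')
--                for i, row in enumerate(platform))
-- ===== Notes on version B (the rewrite author's own statement) =====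
-- stated objective: simpler
-- what changed: Drops get_column and the column-major double loop: one row-major pass adding (height - i) * row.count('O') per row, since every rock in row i weighs height - i regardless of its column; Pre_ excludes the inputs (empty platform, a row shorter than the first) on which A raises IndexError.
-- intended difference: On platforms where some row carries an 'O' beyond the first row's length, A silently ignores those rocks because it only iterates range(len(platform[0])) columns and returns an undercount, while B counts every rock with its row weight, which is the intended total load. — e.g. on calc(["O", ".O"]): A returns 2, B returns 3
import Mathlib
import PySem

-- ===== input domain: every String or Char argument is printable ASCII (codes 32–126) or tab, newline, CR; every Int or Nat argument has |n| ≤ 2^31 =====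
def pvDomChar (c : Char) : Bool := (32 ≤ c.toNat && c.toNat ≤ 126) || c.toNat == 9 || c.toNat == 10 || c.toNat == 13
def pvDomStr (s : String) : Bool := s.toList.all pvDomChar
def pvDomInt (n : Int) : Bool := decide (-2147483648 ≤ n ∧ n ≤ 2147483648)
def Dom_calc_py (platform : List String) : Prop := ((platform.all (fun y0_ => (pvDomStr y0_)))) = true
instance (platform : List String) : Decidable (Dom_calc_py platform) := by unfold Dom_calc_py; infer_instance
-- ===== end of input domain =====

-- B replaces A's column-major double loop (building each column with get_column) by one
-- row-major pass adding (height - i) * row.count('O') per row: simpler.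

-- ===== PORT A =====
-- get_column: builds column j by appending line[j] for each line; the .getD ' '
-- totalizes the IndexError case (excluded by Pre_calc_py), exact inside Pre_calc_py.
def getColumnPy (j : Int) (platform : List String) : List Char :=
  platform.foldl (fun column line => column ++ [(PySem.List.pyGet? line.toList j).getD ' ']) []

def calc_py (platform : List String) : Int :=
  let w := ((PySem.List.pyGet? platform 0).getD "").toList.length
  (PySem.List.pyRange 0 (w : Int) 1).foldl
    (fun total i =>
      let column := getColumnPy i platform
      (PySem.List.enumerate column 0).foldl
        (fun total p => if p.2 = 'O' then total + ((column.length : Int) - p.1) else total)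
        total)
    0

-- ===== PORT B =====
def calc_py_alt (platform : List String) : Int :=
  let height := platform.length
  ((PySem.List.enumerate platform 0).map
    (fun p => ((height : Int) - p.1) * ((p.2.toList.count 'O' : Nat) : Int))).sum

-- ===== PRECONDITION & SPEC =====
-- Pre_ excludes exactly the inputs where A raises IndexError: the empty platform
-- (platform[0]) and ragged platforms with a row shorter than the first row (line[j]).
def Pre_calc_py (platform : List String) : Prop :=
  platform ≠ [] ∧ ∀ s ∈ platform, (platform.headD "").toList.length ≤ s.toList.length
instance (platform : List String) : Decidable (Pre_calc_py platform) := by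
  unfold Pre_calc_py; infer_instance

def pvWitness_calc_py : List String := ["O.O", ".O.", "OOO"]

-- On platforms where some row carries an 'O' beyond the first row's length, A silently
-- ignores those rocks (it only iterates range(len(platform[0])) columns) and returns an
-- undercount, while B counts every rock with its row weight, the intended total load.
def D_calc_py (platform : List String) : Prop :=
  ∃ s ∈ platform, 'O' ∈ s.toList.drop (platform.headD "").toList.length
instance (platform : List String) : Decidable (D_calc_py platform) := by
  unfold D_calc_py; infer_instance

def Spec_calc_py (platform : List String) (out : Int) : Prop :=
  ¬ D_calc_py platform → out = calc_py_alt platform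
instance (platform : List String) (out : Int) : Decidable (Spec_calc_py platform out) := by
  unfold Spec_calc_py; infer_instance

def pvDiffWitness_calc_py : List String := ["O", ".O"]
def pvDiffWitnessOut_calc_py : Int × Int := (2, 3)

-- ===== CLAIM (what is proved, stated in full; the proofs are below) =====
def Claim_unchanged_calc_py : Prop :=
  ∀ (platform : List String), Dom_calc_py platform → Pre_calc_py platform →
    Spec_calc_py platform (calc_py platform)
def Claim_changed_calc_py : Prop :=
  Dom_calc_py (pvDiffWitness_calc_py) ∧ Pre_calc_py (pvDiffWitness_calc_py) ∧
    D_calc_py (pvDiffWitness_calc_py) ∧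
    calc_py (pvDiffWitness_calc_py) = pvDiffWitnessOut_calc_py.1 ∧
    calc_py_alt (pvDiffWitness_calc_py) = pvDiffWitnessOut_calc_py.2 ∧
    pvDiffWitnessOut_calc_py.1 ≠ pvDiffWitnessOut_calc_py.2
def Claim_exact_calc_py : Prop :=
  ∀ (platform : List String), Dom_calc_py platform → Pre_calc_py platform →
    D_calc_py platform → calc_py platform ≠ calc_py_alt platform

-- ===== LEMMAS AND PROOFS =====

-- enumerate of a mapped list
theorem pv_enumerate_map {α β : Type} (f : α → β) (xs : List α) (s : Int) :
    PySem.List.enumerate (xs.map f) s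
      = (PySem.List.enumerate xs s).map (fun p => (p.1, f p.2)) := by
  induction xs generalizing s with
  | nil => rfl
  | cons x xs ih => simp [PySem.List.enumerate_cons, ih]

-- A's inner loop shape: conditional accumulation as a sum of ite-terms
theorem pv_foldl_if_add {α : Type} (P : α → Prop) [DecidablePred P] (g : α → Int)
    (l : List α) (a : Int) :
    l.foldl (fun acc x => if P x then acc + g x else acc) a
      = a + (l.map (fun x => if P x then g x else 0)).sum := by
  induction l generalizing a with
  | nil => simp
  | cons x l ih =>
    simp only [List.foldl_cons, List.map_cons, List.sum_cons, ih]
    split_ifs <;> ring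

-- exchanging the two summations (column-major ↔ row-major)
theorem pv_sum_sum_comm {α β : Type} (as : List α) (bs : List β) (f : α → β → Int) :
    (as.map (fun a => (bs.map (f a)).sum)).sum
      = (bs.map (fun b => (as.map (fun a => f a b)).sum)).sum := by
  induction as with
  | nil => simp
  | cons a as ih =>
    simp only [List.map_cons, List.sum_cons, ih, PySem.List.sum_map_add_int]

-- per-row: the column-indexed ite-sum equals weight times the 'O'-count of the row prefix
theorem pv_row_sum (w : Nat) (r : List Char) (c : Int) (h : w ≤ r.length) :
    ((PySem.List.pyRange 0 (w : Int) 1).map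
        (fun i => if (PySem.List.pyGet? r i).getD ' ' = 'O' then c else 0)).sum
      = c * (((r.take w).count 'O' : Nat) : Int) := by
  induction w with
  | zero => simp [PySem.List.pyRange]
  | succ w ih =>
    have hw : w < r.length := by omega
    have hcast : ((w + 1 : Nat) : Int) = (w : Int) + 1 := by push_cast; ring
    rw [hcast, PySem.List.pyRange_one_succ_right (by positivity), List.map_append,
      List.sum_append, ih (by omega)]
    have hget : PySem.List.pyGet? r (w : Int) = some r[w] := by
      rw [PySem.List.pyGet?_natCast]; simp [hw]
    have htake : r.take (w + 1) = r.take w ++ [r[w]] := by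
      rw [List.take_add_one]; simp [hw]
    rw [htake]
    simp only [List.map_cons, List.map_nil, List.sum_cons, List.sum_nil, hget,
      List.count_append, List.count_cons, List.count_nil, Option.getD_some]
    by_cases hO : r[w] = 'O' <;> simp [hO] <;> ring_nf

-- A, inside Pre_, computed row-major over row *prefixes* of the first row's length
theorem calc_py_take (platform : List String) (hpre : Pre_calc_py platform) :
    calc_py platform
      = ((PySem.List.enumerate platform 0).map
          (fun p => ((platform.length : Int) - p.1) *
            (((p.2.toList.take ((platform.headD "").toList.length)).count 'O' : Nat) : Int))).sum := by
  obtain ⟨hne, hlen⟩ := hpre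
  obtain ⟨hd, tl, rfl⟩ := List.exists_cons_of_ne_nil hne
  simp only [calc_py, getColumnPy]
  set plat := hd :: tl with hplat
  have hw0 : ((PySem.List.pyGet? plat 0).getD "") = hd := by simp [hplat]
  set w := ((PySem.List.pyGet? plat 0).getD "").toList.length with hwdef
  have hcol : ∀ i : Int,
      plat.foldl (fun column line => column ++ [(PySem.List.pyGet? line.toList i).getD ' ']) []
        = plat.map (fun line => (PySem.List.pyGet? line.toList i).getD ' ') := by
    intro i
    rw [PySem.List.foldl_append_singleton_eq_map]; rfl
  simp only [hcol]
  have hinner : ∀ (i : Int) (t : Int),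
      (PySem.List.enumerate (plat.map (fun line => (PySem.List.pyGet? line.toList i).getD ' ')) 0).foldl
        (fun total p => if p.2 = 'O' then
            total + (((plat.map (fun line => (PySem.List.pyGet? line.toList i).getD ' ')).length : Int) - p.1)
          else total) t
      = t + ((PySem.List.enumerate plat 0).map
          (fun p => if (PySem.List.pyGet? p.2.toList i).getD ' ' = 'O'
            then ((plat.length : Int) - p.1) else 0)).sum := by
    intro i t
    rw [pv_foldl_if_add (fun p : Int × Char => p.2 = 'O')
        (fun p => ((plat.map (fun line => (PySem.List.pyGet? line.toList i).getD ' ')).length : Int) - p.1)]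
    rw [pv_enumerate_map, List.map_map]
    simp only [Function.comp_def, List.length_map]
  simp only [hinner]
  rw [PySem.List.foldl_add, pv_sum_sum_comm, zero_add]
  refine congrArg List.sum (List.map_congr_left ?_)
  intro p hp
  rw [PySem.List.mem_enumerate_iff] at hp
  obtain ⟨k, hk, rfl⟩ := hp
  have hmem : plat[k] ∈ plat := List.getElem_mem hk
  have hwle : w ≤ plat[k].toList.length := by
    have := hlen plat[k] hmem
    simpa [hwdef, hw0, hplat] using this
  have := pv_row_sum w plat[k].toList ((plat.length : Int) - (0 + (k : Int))) hwle
  simpa [hwdef, hw0, hplat] using this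

-- a sum of nonnegative integers with one positive member is positive
theorem pv_sum_pos_of_mem (l : List Int) (h0 : ∀ x ∈ l, 0 ≤ x)
    (x : Int) (hx : x ∈ l) (hp : 0 < x) : 0 < l.sum := by
  induction l with
  | nil => cases hx
  | cons y l ih =>
    rcases List.mem_cons.1 hx with rfl | hx'
    · have : 0 ≤ l.sum := List.sum_nonneg (fun z hz => h0 z (List.mem_cons_of_mem _ hz))
      simp only [List.sum_cons]; omega
    · have hy : 0 ≤ y := h0 y (List.mem_cons_self ..)
      have := ih (fun z hz => h0 z (List.mem_cons_of_mem _ hz)) hx'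
      simp only [List.sum_cons]; omega

theorem calc_py_unchanged (platform : List String) (hpre : Pre_calc_py platform)
    (hd : ¬ D_calc_py platform) : calc_py platform = calc_py_alt platform := by
  rw [calc_py_take platform hpre]
  unfold calc_py_alt
  refine congrArg List.sum (List.map_congr_left ?_)
  intro p hp
  rw [PySem.List.mem_enumerate_iff] at hp
  obtain ⟨k, hk, rfl⟩ := hp
  have hmem : platform[k] ∈ platform := List.getElem_mem hk
  have hno : 'O' ∉ platform[k].toList.drop (platform.headD "").toList.length := by
    intro h; exact hd ⟨platform[k], hmem, h⟩
  have hcnt : (platform[k].toList.take ((platform.headD "").toList.length)).count 'O'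
      = platform[k].toList.count 'O' := by
    conv_rhs => rw [← List.take_append_drop ((platform.headD "").toList.length) platform[k].toList]
    rw [List.count_append, List.count_eq_zero_of_not_mem hno]
    omega
  rw [hcnt]

theorem calc_py_strict (platform : List String) (hpre : Pre_calc_py platform)
    (hd : D_calc_py platform) : calc_py platform < calc_py_alt platform := by
  have hA := calc_py_take platform hpre
  set w := (platform.headD "").toList.length with hwdef
  have hsplit : ∀ p ∈ PySem.List.enumerate platform 0,
      ((platform.length : Int) - p.1) * ((p.2.toList.count 'O' : Nat) : Int)
        = ((platform.length : Int) - p.1) * (((p.2.toList.take w).count 'O' : Nat) : Int)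
          + ((platform.length : Int) - p.1) * (((p.2.toList.drop w).count 'O' : Nat) : Int) := by
    intro p _
    have : p.2.toList.count 'O' = (p.2.toList.take w).count 'O' + (p.2.toList.drop w).count 'O' := by
      conv_lhs => rw [← List.take_append_drop w p.2.toList]
      rw [List.count_append]
    rw [this]; push_cast; ring
  have halt : calc_py_alt platform
      = ((PySem.List.enumerate platform 0).map
          (fun p => ((platform.length : Int) - p.1) *
            (((p.2.toList.take w).count 'O' : Nat) : Int))).sum
        + ((PySem.List.enumerate platform 0).map
          (fun p => ((platform.length : Int) - p.1) *
            (((p.2.toList.drop w).count 'O' : Nat) : Int))).sum := by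
    simp only [calc_py_alt]
    rw [List.map_congr_left hsplit, PySem.List.sum_map_add_int]
  have hpos : 0 < ((PySem.List.enumerate platform 0).map
      (fun p => ((platform.length : Int) - p.1) *
        (((p.2.toList.drop w).count 'O' : Nat) : Int))).sum := by
    obtain ⟨s, hs, hO⟩ := hd
    obtain ⟨k, hk, rfl⟩ := List.mem_iff_getElem.1 hs
    refine pv_sum_pos_of_mem _ ?_
      (((platform.length : Int) - (0 + (k : Int))) *
        (((platform[k].toList.drop w).count 'O' : Nat) : Int)) ?_ ?_
    · intro x hx
      rw [List.mem_map] at hx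
      obtain ⟨p, hp, rfl⟩ := hx
      rw [PySem.List.mem_enumerate_iff] at hp
      obtain ⟨j, hj, rfl⟩ := hp
      have : (0 + (j : Int)) < (platform.length : Int) := by push_cast; omega
      exact mul_nonneg (by omega) (Int.natCast_nonneg _)
    · exact List.mem_map_of_mem
        ((PySem.List.mem_enumerate_iff _ _ _).2 ⟨k, hk, rfl⟩)
    · have h1 : (0 + (k : Int)) < (platform.length : Int) := by push_cast; omega
      have h2 : 0 < (platform[k].toList.drop w).count 'O' :=
        List.count_pos_iff.2 hO
      have h2' : (0 : Int) < (((platform[k].toList.drop w).count 'O' : Nat) : Int) := by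
        exact_mod_cast h2
      exact mul_pos (by omega) h2'
  rw [hA, halt]
  omega

-- ===== VERDICT (by name: the statements are the Claim_ definitions above) =====
theorem calc_py_spec : Claim_unchanged_calc_py := by
  intro platform _ hpre hd
  exact calc_py_unchanged platform hpre hd

theorem calc_py_changed : Claim_changed_calc_py := by
  unfold Claim_changed_calc_py; decide

theorem calc_py_tight : Claim_exact_calc_py := by
  intro platform _ hpre hd
  exact ne_of_lt (calc_py_strict platform hpre hd)
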